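-- pv_equiv track=rewrite | github.com/nlp-noob/get-gender-from-user | utils/order_extract.py | split_special_word
-- ===== SOURCE A (Python) =====
-- def split_special_word(word):
--     # 特殊字符需要进行全部分割
--     pieces_list = []
--     a_normal_piece = ""
--     special_pieces = []
--     for a_char in word:
--         if a_char.isalnum():
--             if special_pieces:
--                 pieces_list.extend(special_pieces)
--                 special_pieces = []
--             a_normal_piece += a_char
--         else:
--             if a_normal_piece:
--                 pieces_list.append(a_normal_piece)
--                 a_normal_piece = ""
--             special_pieces.append(a_char)
--     if a_normal_piece:
--         pieces_list.append(a_normal_piece)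
--     if len(special_pieces) > 0:
--         pieces_list.extend(special_pieces)
--     return pieces_list
-- ===== SOURCE B (Python) =====
-- def split_special_word(word):
--     # Staged passes: first compute every cut position (a boundary wherever the
--     # adjacent pair is not alnum-alnum), then slice the word between cuts.
--     if not word:
--         return []
--     n = len(word)
--     cuts = [0]
--     for i in range(1, n):
--         if not (word[i - 1].isalnum() and word[i].isalnum()):
--             cuts.append(i)
--     cuts.append(n)
--     return [word[a:b] for a, b in zip(cuts, cuts[1:])]
-- ===== Notes on version B (the rewrite author's own statement) =====
-- stated objective: alternative
-- what changed: Replaced A's one-pass accumulator-and-flush state machine with two staged passes: first compute the list of cut positions (a boundary at every index whose adjacent pair is not alnum-alnum), then slice the word between consecutive cuts.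
import Mathlib
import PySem

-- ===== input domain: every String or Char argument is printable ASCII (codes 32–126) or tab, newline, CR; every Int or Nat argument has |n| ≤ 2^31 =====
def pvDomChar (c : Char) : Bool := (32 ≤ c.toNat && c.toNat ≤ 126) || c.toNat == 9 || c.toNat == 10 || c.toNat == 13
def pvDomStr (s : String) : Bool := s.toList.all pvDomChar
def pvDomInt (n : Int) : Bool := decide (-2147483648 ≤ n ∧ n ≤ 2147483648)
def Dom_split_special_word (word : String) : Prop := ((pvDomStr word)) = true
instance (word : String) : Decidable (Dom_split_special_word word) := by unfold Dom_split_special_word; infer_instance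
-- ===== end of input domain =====

-- B replaces A's one-pass accumulator-and-flush state machine with two staged passes:
-- first compute all cut positions (a boundary wherever an adjacent pair is not alnum-alnum),
-- then slice the word between consecutive cuts; same return value (alternative decomposition).

-- ===== PORT A =====
-- the loop body of A: state = (pieces_list, a_normal_piece as chars, special_pieces as chars)
def pvStepA (st : List String × List Char × List Char) (a_char : Char) :
    List String × List Char × List Char :=
  if PySem.Chars.isalnum a_char then
    (if st.2.2 = [] then st.1 else st.1 ++ st.2.2.map (fun ch => String.mk [ch]),
     st.2.1 ++ [a_char], [])
  else
    (if st.2.1 = [] then st.1 else st.1 ++ [String.mk st.2.1],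
     [], st.2.2 ++ [a_char])

def split_special_word (word : String) : List String :=
  let st := word.toList.foldl pvStepA ([], [], [])
  let p1 := if st.2.1 = [] then st.1 else st.1 ++ [String.mk st.2.1]
  if st.2.2.length > 0 then p1 ++ st.2.2.map (fun ch => String.mk [ch]) else p1

-- ===== PORT B =====
-- 'not (word[i-1].isalnum() and word[i].isalnum())'; getD is exact here since
-- B only ever indexes with i in range(1, len(word)), so both indices are in range
def pvBnd (cs : List Char) (i : Nat) : Bool :=
  !(PySem.Chars.isalnum (cs.getD (i - 1) ' ') && PySem.Chars.isalnum (cs.getD i ' '))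

-- cuts = [0] + [i for i in range(1, n) if boundary] + [n]
def pvCuts (cs : List Char) : List Nat :=
  0 :: ((List.range' 1 (cs.length - 1)).filter (pvBnd cs) ++ [cs.length])

-- word[a:b]; exact since every cut pair satisfies 0 ≤ a ≤ b ≤ len(word)
def pvSliceCL (cs : List Char) (a b : Nat) : List Char := (cs.drop a).take (b - a)

def split_special_word_alt (word : String) : List String :=
  if word.toList = [] then []
  else ((pvCuts word.toList).zip (pvCuts word.toList).tail).map
        (fun p => String.mk (pvSliceCL word.toList p.1 p.2))

-- ===== PRECONDITION & SPEC =====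
def Spec_split_special_word (word : String) (out : List String) : Prop := out = split_special_word_alt word
instance (word : String) (out : List String) : Decidable (Spec_split_special_word word out) := by unfold Spec_split_special_word; infer_instance

-- ===== CLAIM (what is proved, stated in full; the proofs are below) =====
def Claim_equal_split_special_word : Prop := ∀ (word : String), Dom_split_special_word word → Spec_split_special_word word (split_special_word word)

-- ===== LEMMAS AND PROOFS =====

-- common recursive specification both ports are reduced to
def pvSplit : List Char → List String
  | [] => []
  | c :: cs =>
    if PySem.Chars.isalnum c then
      String.mk (c :: cs.takeWhile (fun d => PySem.Chars.isalnum d == true)) ::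
        pvSplit (cs.dropWhile (fun d => PySem.Chars.isalnum d == true))
    else
      String.mk [c] :: pvSplit cs
termination_by l => l.length
decreasing_by
  · simp only [List.length_cons]
    exact Nat.lt_succ_of_le (List.length_dropWhile_le _ _)
  · simp

-- ---- A-side: the fold equals pvEmit ∘ pvGroups, which equals pvSplit ----

def pvGroups : List Char → List (Bool × List Char)
  | [] => []
  | c :: cs =>
    let k := PySem.Chars.isalnum c
    (k, c :: cs.takeWhile (fun d => PySem.Chars.isalnum d == k)) ::
      pvGroups (cs.dropWhile (fun d => PySem.Chars.isalnum d == k))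
termination_by l => l.length
decreasing_by
  simp only [List.length_cons]
  exact Nat.lt_succ_of_le (List.length_dropWhile_le _ _)

def pvEmit : List (Bool × List Char) → List String
  | [] => []
  | (k, g) :: gs =>
    (if k then [String.mk g] else g.map (fun ch => String.mk [ch])) ++ pvEmit gs

def pvFin (st : List String × List Char × List Char) : List String :=
  let p1 := if st.2.1 = [] then st.1 else st.1 ++ [String.mk st.2.1]
  if st.2.2.length > 0 then p1 ++ st.2.2.map (fun ch => String.mk [ch]) else p1

theorem pvA_eq (word : String) :
    split_special_word word = pvFin (word.toList.foldl pvStepA ([], [], [])) := rfl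

theorem pvFin_append (P Q : List String) (n s : List Char) :
    pvFin (P ++ Q, n, s) = P ++ pvFin (Q, n, s) := by
  unfold pvFin
  by_cases hn : n = [] <;> by_cases hs : s = [] <;> simp [hn, hs, List.length_pos_iff]

-- the pieces_list is only ever appended to: a prefix factors out
theorem pvPrefix (cs : List Char) : ∀ (P : List String) (n s : List Char),
    cs.foldl pvStepA (P, n, s) =
      (P ++ (cs.foldl pvStepA ([], n, s)).1,
       (cs.foldl pvStepA ([], n, s)).2.1, (cs.foldl pvStepA ([], n, s)).2.2) := by
  induction cs with
  | nil => intro P n s; simp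
  | cons c cs ih =>
    intro P n s
    simp only [List.foldl_cons]
    by_cases hc : PySem.Chars.isalnum c = true
    · have hstep : ∀ (Q : List String), pvStepA (Q, n, s) c =
          (Q ++ s.map (fun ch => String.mk [ch]), n ++ [c], []) := by
        intro Q; unfold pvStepA; rcases s with _ | ⟨d, s⟩ <;> simp [hc]
      rw [hstep, hstep, ih (P ++ s.map (fun ch => String.mk [ch])),
          ih ([] ++ s.map (fun ch => String.mk [ch]))]
      simp
    · have hstep : ∀ (Q : List String), pvStepA (Q, n, s) c =
          (Q ++ (if n = [] then [] else [String.mk n]), [], s ++ [c]) := by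
        intro Q; unfold pvStepA; rcases n with _ | ⟨d, m⟩ <;> simp [hc]
      rw [hstep, hstep, ih (P ++ (if n = [] then [] else [String.mk n])),
          ih ([] ++ (if n = [] then [] else [String.mk n]))]
      simp

theorem pvRunAlnum (r : List Char) : ∀ n : List Char, (∀ d ∈ r, PySem.Chars.isalnum d = true) →
    r.foldl pvStepA ([], n, []) = ([], n ++ r, []) := by
  induction r with
  | nil => simp
  | cons c r ih =>
    intro n h
    simp only [List.foldl_cons]
    have hc := h c (by simp)
    have hstep : pvStepA ([], n, []) c = ([], n ++ [c], []) := by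
      unfold pvStepA; simp [hc]
    rw [hstep, ih (n ++ [c]) (fun d hd => h d (by simp [hd]))]
    simp

theorem pvRunSpec (r : List Char) : ∀ s : List Char, (∀ d ∈ r, PySem.Chars.isalnum d = false) →
    r.foldl pvStepA ([], [], s) = ([], [], s ++ r) := by
  induction r with
  | nil => simp
  | cons c r ih =>
    intro s h
    simp only [List.foldl_cons]
    have hc := h c (by simp)
    have hstep : pvStepA ([], [], s) c = ([], [], s ++ [c]) := by
      unfold pvStepA; simp [hc]
    rw [hstep, ih (s ++ [c]) (fun d hd => h d (by simp [hd]))]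
    simp

theorem pvDropHead {p : Char → Bool} : ∀ (l : List Char) (d : Char) (l' : List Char),
    l.dropWhile p = d :: l' → p d = false := by
  intro l
  induction l with
  | nil => intro d l' h; simp at h
  | cons c l ih =>
    intro d l' h
    by_cases hc : p c = true
    · rw [List.dropWhile_cons_of_pos hc] at h; exact ih d l' h
    · rw [List.dropWhile_cons_of_neg hc] at h
      obtain ⟨rfl, -⟩ := List.cons.inj h
      simpa using hc

theorem pvFlushN (rest : List Char) (m : List Char) (hm : m ≠ [])
    (hr : rest = [] ∨ ∃ d r', rest = d :: r' ∧ PySem.Chars.isalnum d = false) :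
    pvFin (rest.foldl pvStepA ([], m, [])) =
      String.mk m :: pvFin (rest.foldl pvStepA ([], [], [])) := by
  rcases hr with rfl | ⟨d, r', rfl, hd⟩
  · simp [pvFin, hm]
  · simp only [List.foldl_cons]
    have h1 : pvStepA ([], m, []) d = ([String.mk m], [], [d]) := by
      unfold pvStepA; simp [hd, hm]
    have h2 : pvStepA ([], [], []) d = ([], [], [d]) := by
      unfold pvStepA; simp [hd]
    rw [h1, h2, pvPrefix r' [String.mk m] [] [d], pvFin_append]
    simp

theorem pvFlushS (rest : List Char) (s : List Char)
    (hr : rest = [] ∨ ∃ d r', rest = d :: r' ∧ PySem.Chars.isalnum d = true) :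
    pvFin (rest.foldl pvStepA ([], [], s)) =
      s.map (fun ch => String.mk [ch]) ++ pvFin (rest.foldl pvStepA ([], [], [])) := by
  rcases hr with rfl | ⟨d, r', rfl, hd⟩
  · cases s <;> simp [pvFin]
  · simp only [List.foldl_cons]
    have h1 : pvStepA ([], [], s) d = (s.map (fun ch => String.mk [ch]), [d], []) := by
      unfold pvStepA; cases s <;> simp [hd]
    have h2 : pvStepA ([], [], []) d = ([], [d], []) := by
      unfold pvStepA; simp [hd]
    rw [h1, h2, pvPrefix r' (s.map (fun ch => String.mk [ch])) [d] [], pvFin_append]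

theorem pvMain (N : Nat) : ∀ (cs : List Char), cs.length ≤ N →
    pvFin (cs.foldl pvStepA ([], [], [])) = pvEmit (pvGroups cs) := by
  induction N with
  | zero =>
    intro cs h
    have : cs = [] := List.eq_nil_of_length_eq_zero (Nat.le_zero.mp h)
    subst this
    simp [pvFin, pvGroups, pvEmit]
  | succ N ih =>
    intro cs h
    match cs with
    | [] => simp [pvFin, pvGroups, pvEmit]
    | c :: cs' =>
      have hlen : cs'.length ≤ N := by simpa using h
      by_cases hc : PySem.Chars.isalnum c = true
      · have hgroups : pvGroups (c :: cs') =
            (true, c :: cs'.takeWhile (fun d => PySem.Chars.isalnum d == true)) ::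
              pvGroups (cs'.dropWhile (fun d => PySem.Chars.isalnum d == true)) := by
          rw [pvGroups]; simp [hc]
        have htake : ∀ d ∈ cs'.takeWhile (fun d => PySem.Chars.isalnum d == true),
            PySem.Chars.isalnum d = true := by
          intro d hd; simpa using List.mem_takeWhile_imp hd
        have hrest : cs'.dropWhile (fun d => PySem.Chars.isalnum d == true) = [] ∨
            ∃ d r', cs'.dropWhile (fun d => PySem.Chars.isalnum d == true) = d :: r' ∧
              PySem.Chars.isalnum d = false := by
          cases hdw : cs'.dropWhile (fun d => PySem.Chars.isalnum d == true) with
          | nil => exact Or.inl rfl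
          | cons d r' =>
            refine Or.inr ⟨d, r', rfl, ?_⟩
            have := pvDropHead _ _ _ hdw
            simpa using this
        have hstep : pvStepA ([], [], []) c = ([], [c], []) := by
          unfold pvStepA; simp [hc]
        calc pvFin ((c :: cs').foldl pvStepA ([], [], []))
            = pvFin ((cs'.takeWhile (fun d => PySem.Chars.isalnum d == true) ++
                cs'.dropWhile (fun d => PySem.Chars.isalnum d == true)).foldl pvStepA ([], [c], [])) := by
              rw [List.foldl_cons, hstep, List.takeWhile_append_dropWhile]
          _ = pvFin ((cs'.dropWhile (fun d => PySem.Chars.isalnum d == true)).foldl pvStepA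
                ([], c :: cs'.takeWhile (fun d => PySem.Chars.isalnum d == true), [])) := by
              rw [List.foldl_append, pvRunAlnum _ [c] htake]; simp
          _ = String.mk (c :: cs'.takeWhile (fun d => PySem.Chars.isalnum d == true)) ::
                pvFin ((cs'.dropWhile (fun d => PySem.Chars.isalnum d == true)).foldl pvStepA ([], [], [])) := by
              rw [pvFlushN _ _ (by simp) hrest]
          _ = pvEmit (pvGroups (c :: cs')) := by
              rw [ih _ (le_trans (List.length_dropWhile_le _ _) hlen), hgroups, pvEmit]
              simp
      · have hcf : PySem.Chars.isalnum c = false := by simpa using hc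
        have hgroups : pvGroups (c :: cs') =
            (false, c :: cs'.takeWhile (fun d => PySem.Chars.isalnum d == false)) ::
              pvGroups (cs'.dropWhile (fun d => PySem.Chars.isalnum d == false)) := by
          rw [pvGroups]; simp [hcf]
        have htake : ∀ d ∈ cs'.takeWhile (fun d => PySem.Chars.isalnum d == false),
            PySem.Chars.isalnum d = false := by
          intro d hd; simpa using List.mem_takeWhile_imp hd
        have hrest : cs'.dropWhile (fun d => PySem.Chars.isalnum d == false) = [] ∨
            ∃ d r', cs'.dropWhile (fun d => PySem.Chars.isalnum d == false) = d :: r' ∧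
              PySem.Chars.isalnum d = true := by
          cases hdw : cs'.dropWhile (fun d => PySem.Chars.isalnum d == false) with
          | nil => exact Or.inl rfl
          | cons d r' =>
            refine Or.inr ⟨d, r', rfl, ?_⟩
            have := pvDropHead _ _ _ hdw
            simpa using this
        have hstep : pvStepA ([], [], []) c = ([], [], [c]) := by
          unfold pvStepA; simp [hcf]
        calc pvFin ((c :: cs').foldl pvStepA ([], [], []))
            = pvFin ((cs'.takeWhile (fun d => PySem.Chars.isalnum d == false) ++
                cs'.dropWhile (fun d => PySem.Chars.isalnum d == false)).foldl pvStepA ([], [], [c])) := by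
              rw [List.foldl_cons, hstep, List.takeWhile_append_dropWhile]
          _ = pvFin ((cs'.dropWhile (fun d => PySem.Chars.isalnum d == false)).foldl pvStepA
                ([], [], c :: cs'.takeWhile (fun d => PySem.Chars.isalnum d == false))) := by
              rw [List.foldl_append, pvRunSpec _ [c] htake]; simp
          _ = (c :: cs'.takeWhile (fun d => PySem.Chars.isalnum d == false)).map (fun ch => String.mk [ch]) ++
                pvFin ((cs'.dropWhile (fun d => PySem.Chars.isalnum d == false)).foldl pvStepA ([], [], [])) := by
              rw [pvFlushS _ _ hrest]
          _ = pvEmit (pvGroups (c :: cs')) := by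
              rw [ih _ (le_trans (List.length_dropWhile_le _ _) hlen), hgroups, pvEmit]
              simp

-- a wholly non-alnum prefix is emitted by pvSplit character by character
theorem pvSplit_false_prefix (g : List Char) (r : List Char)
    (hg : ∀ x ∈ g, PySem.Chars.isalnum x = false) :
    pvSplit (g ++ r) = g.map (fun ch => String.mk [ch]) ++ pvSplit r := by
  induction g with
  | nil => simp
  | cons x g ih =>
    have hx := hg x (by simp)
    rw [List.cons_append, pvSplit]
    simp only [hx]
    rw [ih (fun y hy => hg y (by simp [hy]))]
    simp

theorem pvEmitGroups_eq_split (N : Nat) : ∀ (cs : List Char), cs.length ≤ N →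
    pvEmit (pvGroups cs) = pvSplit cs := by
  induction N with
  | zero =>
    intro cs h
    have : cs = [] := List.eq_nil_of_length_eq_zero (Nat.le_zero.mp h)
    subst this; simp [pvGroups, pvEmit, pvSplit]
  | succ N ih =>
    intro cs h
    match cs with
    | [] => simp [pvGroups, pvEmit, pvSplit]
    | c :: cs' =>
      have hlen : cs'.length ≤ N := by simpa using h
      by_cases hc : PySem.Chars.isalnum c = true
      · rw [pvGroups]
        simp only [hc]
        rw [pvEmit, pvSplit]
        simp only [hc, if_pos]
        rw [ih _ (le_trans (List.length_dropWhile_le _ _) hlen)]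
        simp
      · have hcf : PySem.Chars.isalnum c = false := by simpa using hc
        rw [pvGroups]
        simp only [hcf]
        rw [pvEmit, pvSplit]
        simp only [hcf]
        rw [ih _ (le_trans (List.length_dropWhile_le _ _) hlen)]
        have hg : ∀ x ∈ c :: cs'.takeWhile (fun d => PySem.Chars.isalnum d == false),
            PySem.Chars.isalnum x = false := by
          intro x hx
          rcases List.mem_cons.mp hx with rfl | hx
          · exact hcf
          · simpa using List.mem_takeWhile_imp hx
        have : pvSplit ((c :: cs'.takeWhile (fun d => PySem.Chars.isalnum d == false)) ++
            cs'.dropWhile (fun d => PySem.Chars.isalnum d == false)) =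
            (c :: cs'.takeWhile (fun d => PySem.Chars.isalnum d == false)).map (fun ch => String.mk [ch]) ++
              pvSplit (cs'.dropWhile (fun d => PySem.Chars.isalnum d == false)) :=
          pvSplit_false_prefix _ _ hg
    -- rewrite pvSplit cs' via cs' = takeWhile ++ dropWhile
        rw [List.cons_append] at this
        rw [List.takeWhile_append_dropWhile] at this
        rw [pvSplit] at this
        simp only [hcf] at this
        simp only [Bool.false_eq_true, if_false] at this ⊢
        rw [List.map_cons] at this
        have h2 := List.cons.inj this
        rw [h2.2]
        simp

-- ---- B-side: the cuts-and-slices computation equals pvSplit ----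

def pvTok (cs : List Char) : List String :=
  ((pvCuts cs).zip (pvCuts cs).tail).map (fun p => String.mk (pvSliceCL cs p.1 p.2))

theorem pvRange'_add_map (k : Nat) : ∀ (s n : Nat),
    List.range' (s + k) n = (List.range' s n).map (· + k) := by
  intro s n
  induction n generalizing s with
  | zero => simp
  | succ n ih =>
    rw [List.range'_succ, List.range'_succ, List.map_cons, ← ih (s + 1)]
    congr 2
    omega

theorem pvGetD_append_right (l₁ l₂ : List Char) (i : Nat) (d : Char) :
    (l₁ ++ l₂).getD (l₁.length + i) d = l₂.getD i d := by
  simp [List.getD, List.getElem?_append_right (Nat.le_add_right _ _)]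

-- shifting a boundary check past a prefix of length k
theorem pvBnd_shift (p d : List Char) (i : Nat) (hi : 1 ≤ i) :
    pvBnd (p ++ d) (i + p.length) = pvBnd d i := by
  unfold pvBnd
  have h1 : (p ++ d).getD (i + p.length - 1) ' ' = d.getD (i - 1) ' ' := by
    have : i + p.length - 1 = p.length + (i - 1) := by omega
    rw [this, pvGetD_append_right]
  have h2 : (p ++ d).getD (i + p.length) ' ' = d.getD i ' ' := by
    have : i + p.length = p.length + i := by omega
    rw [this, pvGetD_append_right]
  rw [h1, h2]

-- decomposing the cut list at the end of the first token
theorem pvCuts_decomp (p d : List Char) (hp : p ≠ []) (hd : d ≠ [])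
    (h1 : ∀ i, 1 ≤ i → i < p.length → pvBnd (p ++ d) i = false)
    (h2 : pvBnd (p ++ d) p.length = true) :
    pvCuts (p ++ d) = 0 :: (pvCuts d).map (· + p.length) := by
  have hk : 1 ≤ p.length := List.length_pos_iff.mpr hp
  have hdl : 1 ≤ d.length := List.length_pos_iff.mpr hd
  have hn : (p ++ d).length = p.length + d.length := List.length_append ..
  unfold pvCuts
  rw [hn]
  have hsplit : List.range' 1 (p.length + d.length - 1) =
      List.range' 1 (p.length - 1) ++ (p.length :: List.range' (p.length + 1) (d.length - 1)) := by
    rw [← List.range'_succ]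
    have h' : List.range' 1 (p.length - 1) ++ List.range' (1 + (p.length - 1)) (d.length - 1 + 1)
        = List.range' 1 (p.length - 1 + (d.length - 1 + 1)) := by
      simpa using List.range'_append 1 (p.length - 1) (d.length - 1 + 1) 1
    have e1 : 1 + (p.length - 1) = p.length := by omega
    have e2 : p.length - 1 + (d.length - 1 + 1) = p.length + d.length - 1 := by omega
    rw [e1, e2] at h'
    exact h'.symm
  rw [hsplit, List.filter_append]
  have hfil1 : (List.range' 1 (p.length - 1)).filter (pvBnd (p ++ d)) = [] := by
    rw [List.filter_eq_nil_iff]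
    intro i hi
    have := List.mem_range'_1.mp hi
    simp [h1 i this.1 (by omega)]
  have hshift : List.range' (p.length + 1) (d.length - 1) =
      (List.range' 1 (d.length - 1)).map (· + p.length) := by
    have := pvRange'_add_map p.length 1 (d.length - 1)
    simpa [Nat.add_comm] using this
  have hfil2 : (List.range' (p.length + 1) (d.length - 1)).filter (pvBnd (p ++ d)) =
      ((List.range' 1 (d.length - 1)).filter (pvBnd d)).map (· + p.length) := by
    rw [hshift, List.filter_map]
    congr 1
    apply List.filter_congr
    intro i hi
    have hi1 := (List.mem_range'_1.mp hi).1
    simpa using pvBnd_shift p d i hi1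
  rw [List.filter_cons_of_pos h2, hfil1, hfil2]
  simp [List.length_append, Nat.add_comm]

theorem pvSlice_shift (p d : List Char) (a b : Nat) :
    pvSliceCL (p ++ d) (a + p.length) (b + p.length) = pvSliceCL d a b := by
  unfold pvSliceCL
  have h : a + p.length = p.length + a := by omega
  rw [h, List.drop_length_add_append]
  congr 1
  omega

theorem pvCuts_head (cs : List Char) : ∃ M, pvCuts cs = 0 :: M := ⟨_, rfl⟩

-- peeling the first token off B's computation
theorem pvTok_decomp (p d : List Char) (hp : p ≠ []) (hd : d ≠ [])
    (h1 : ∀ i, 1 ≤ i → i < p.length → pvBnd (p ++ d) i = false)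
    (h2 : pvBnd (p ++ d) p.length = true) :
    pvTok (p ++ d) = String.mk p :: pvTok d := by
  unfold pvTok
  rw [pvCuts_decomp p d hp hd h1 h2]
  obtain ⟨M, hM⟩ := pvCuts_head d
  rw [hM]
  simp only [List.map_cons, List.tail_cons, List.zip_cons_cons, List.map_cons, Nat.zero_add]
  congr 1
  · -- first token: slice 0 p.length (p ++ d) = p
    unfold pvSliceCL
    simp
  · -- remaining tokens shift back onto d
    have hzip : ((p.length :: List.map (· + p.length) M).zip (List.map (· + p.length) M))
        = ((0 :: M).zip M).map (Prod.map (· + p.length) (· + p.length)) := by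
      rw [show (p.length :: List.map (· + p.length) M) = List.map (· + p.length) (0 :: M) by simp,
          List.zip_map]
    rw [hzip, List.map_map]
    apply List.map_congr_left
    intro x _
    simp only [Function.comp_apply, Prod.map_fst, Prod.map_snd]
    rw [pvSlice_shift]

theorem pvAllAlnum_cuts (cs : List Char) (hne : cs ≠ [])
    (hall : ∀ x ∈ cs, PySem.Chars.isalnum x = true) :
    pvCuts cs = [0, cs.length] := by
  unfold pvCuts
  have : (List.range' 1 (cs.length - 1)).filter (pvBnd cs) = [] := by
    rw [List.filter_eq_nil_iff]
    intro i hi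
    obtain ⟨hi1, hi2⟩ := List.mem_range'_1.mp hi
    have hlt : i < cs.length := by omega
    have g1 : cs.getD (i - 1) ' ' = cs[i-1]'(by omega) := List.getD_eq_getElem cs ' ' (by omega)
    have g2 : cs.getD i ' ' = cs[i]'hlt := List.getD_eq_getElem cs ' ' hlt
    unfold pvBnd
    rw [g1, g2, hall _ (List.getElem_mem _), hall _ (List.getElem_mem _)]
    simp
  rw [this]
  simp

theorem pvTok_eq_split (N : Nat) : ∀ (cs : List Char), cs ≠ [] → cs.length ≤ N →
    pvTok cs = pvSplit cs := by
  induction N with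
  | zero =>
    intro cs hne h
    exact absurd (List.eq_nil_of_length_eq_zero (Nat.le_zero.mp h)) hne
  | succ N ih =>
    intro cs hne h
    match cs with
    | [] => exact absurd rfl hne
    | c :: cs' =>
      have hlen : cs'.length ≤ N := by simpa using h
      by_cases hc : PySem.Chars.isalnum c = true
      · -- alnum head: first token is the maximal alnum run
        set t := cs'.takeWhile (fun d => PySem.Chars.isalnum d == true) with ht
        set r := cs'.dropWhile (fun d => PySem.Chars.isalnum d == true) with hr
        have hcs' : cs' = t ++ r := (List.takeWhile_append_dropWhile ..).symm
        have hdecomp : c :: cs' = (c :: t) ++ r := by rw [hcs']; rfl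
        have hallp : ∀ x ∈ c :: t, PySem.Chars.isalnum x = true := by
          intro x hx
          rcases List.mem_cons.mp hx with rfl | hx
          · exact hc
          · simpa using List.mem_takeWhile_imp hx
        cases hrc : r with
        | nil =>
          -- the whole word is one alnum run
          have hall : ∀ x ∈ c :: cs', PySem.Chars.isalnum x = true := by
            rw [hdecomp, hrc, List.append_nil]; exact hallp
          unfold pvTok
          rw [pvAllAlnum_cuts _ (by simp) hall]
          rw [pvSplit]
          simp only [hc, if_pos]
          rw [← ht, ← hr, hrc, pvSplit]
          have hslice : pvSliceCL (c :: cs') 0 (cs'.length + 1) = c :: cs' := by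
            unfold pvSliceCL; simp
          have hcs'2 : cs' = t := by rw [hcs', hrc, List.append_nil]
          simp [hslice, ← hcs'2]
        | cons rh rt =>
          have hrne : r ≠ [] := by rw [hrc]; simp
          have hrhf : PySem.Chars.isalnum rh = false := by
            have := pvDropHead cs' rh rt (by rw [← hr, hrc])
            simpa using this
          have hplen : (c :: t).length = t.length + 1 := by simp
          have h1 : ∀ i, 1 ≤ i → i < (c :: t).length → pvBnd ((c :: t) ++ r) i = false := by
            intro i hi1 hi2
            unfold pvBnd
            have hg1 : ((c :: t) ++ r).getD (i - 1) ' ' = (c :: t).getD (i - 1) ' ' := by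
              apply List.getD_append
              simp at hi2 ⊢; omega
            have hg2 : ((c :: t) ++ r).getD i ' ' = (c :: t).getD i ' ' := by
              apply List.getD_append
              exact hi2
            rw [hg1, hg2]
            have e1 : (c :: t).getD (i - 1) ' ' = (c :: t)[i-1]'(by simp at hi2 ⊢; omega) :=
              List.getD_eq_getElem _ ' ' _
            have e2 : (c :: t).getD i ' ' = (c :: t)[i]'hi2 := List.getD_eq_getElem _ ' ' _
            rw [e1, e2, hallp _ (List.getElem_mem _), hallp _ (List.getElem_mem _)]
            simp
          have h2 : pvBnd ((c :: t) ++ r) (c :: t).length = true := by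
            unfold pvBnd
            have hg2 : ((c :: t) ++ r).getD (c :: t).length ' ' = r.getD 0 ' ' := by
              have := pvGetD_append_right (c :: t) r 0 ' '
              simpa using this
            rw [hg2, hrc]
            simp [hrhf]
          have := pvTok_decomp (c :: t) r (by simp) hrne h1 h2
          rw [← hdecomp] at this
          rw [this, pvSplit]
          simp only [hc, if_pos, ← ht, ← hr]
          congr 1
          have hrlen : r.length ≤ N := by
            rw [hcs'] at hlen
            simp at hlen
            omega
          exact ih r hrne hrlen
      · -- non-alnum head: first token is the single character c
        have hcf : PySem.Chars.isalnum c = false := by simpa using hc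
        by_cases hcs : cs' = []
        · subst hcs
          unfold pvTok pvCuts
          rw [pvSplit]
          simp [hcf, pvSliceCL, pvSplit]
        · have hne' : cs' ≠ [] := hcs
          have hdecomp : c :: cs' = [c] ++ cs' := rfl
          have h1 : ∀ i, 1 ≤ i → i < ([c] : List Char).length → pvBnd ([c] ++ cs') i = false := by
            intro i hi1 hi2
            simp at hi2
            omega
          have h2 : pvBnd ([c] ++ cs') ([c] : List Char).length = true := by
            unfold pvBnd
            simp [hcf]
          have := pvTok_decomp [c] cs' (by simp) hne' h1 h2
          rw [← hdecomp] at this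
          rw [this, pvSplit]
          simp only [hcf, Bool.false_eq_true, if_false]
          congr 1
          exact ih cs' hne' hlen

theorem pvAlt_eq (word : String) : split_special_word_alt word = pvSplit word.toList := by
  unfold split_special_word_alt
  by_cases h : word.toList = []
  · rw [if_pos h, h, pvSplit]
  · rw [if_neg h]
    exact pvTok_eq_split word.toList.length word.toList h le_rfl

-- ===== VERDICT (by name: the statement is the Claim_ definition above) =====
theorem split_special_word_spec : Claim_equal_split_special_word := by
  intro word _
  unfold Spec_split_special_word
  rw [pvA_eq, pvAlt_eq,
      pvMain word.toList.length word.toList le_rfl,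
      pvEmitGroups_eq_split word.toList.length word.toList le_rfl]
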